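-- pv_equiv track=rewrite | github.com/roark0/m3u | check2.py | sort_and_remove_duplicates
-- ===== SOURCE A (Python) =====
-- def sort_and_remove_duplicates(json_data):
--     sorted_nodes = sorted(json_data['json'], key=lambda x: x['api'])
--     unique_nodes = []
--     prev_api = None
--     for node in sorted_nodes:
--         if node['api'] != prev_api:
--             unique_nodes.append(node)
--         prev_api = node['api']
--     return unique_nodes
-- ===== SOURCE B (Python) =====
-- def sort_and_remove_duplicates(json_data):
--     first = {}
--     for node in json_data['json']:
--         first.setdefault(node['api'], node)
--     return [first[k] for k in sorted(first)]
-- ===== Notes on version B (the rewrite author's own statement) =====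
-- stated objective: alternative
-- what changed: B builds a dict keyed by api with setdefault (keeping each api's first node), then sorts the api keys and maps them back through the dict, instead of A's stable sort of all nodes followed by an adjacent-duplicate scan.
import Mathlib
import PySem

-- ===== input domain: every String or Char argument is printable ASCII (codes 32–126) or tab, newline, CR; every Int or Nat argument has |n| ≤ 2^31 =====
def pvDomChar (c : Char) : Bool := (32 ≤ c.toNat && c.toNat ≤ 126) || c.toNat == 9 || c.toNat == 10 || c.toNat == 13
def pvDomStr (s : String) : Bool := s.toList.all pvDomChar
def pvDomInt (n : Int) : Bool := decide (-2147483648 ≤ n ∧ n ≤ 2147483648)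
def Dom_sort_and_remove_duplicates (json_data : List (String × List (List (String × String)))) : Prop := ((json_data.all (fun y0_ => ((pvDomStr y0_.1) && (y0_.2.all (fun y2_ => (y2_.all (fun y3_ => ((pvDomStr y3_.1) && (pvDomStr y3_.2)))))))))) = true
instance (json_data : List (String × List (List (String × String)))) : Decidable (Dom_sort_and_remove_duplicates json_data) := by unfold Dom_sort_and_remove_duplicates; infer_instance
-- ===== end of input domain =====

-- B groups nodes into a dict keyed by api via setdefault (first occurrence wins) and then maps the
-- sorted keys back through the dict, instead of A's sort-all-nodes-then-drop-adjacent-duplicates scan.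

-- node['api'] / json_data['json']; the getD default is never reached under Pre_ (the key is present there)
def pvApi (node : List (String × String)) : String := (PySem.Dict.mk node).getD "api" ""

-- ===== PORT A =====
def sort_and_remove_duplicates (json_data : List (String × List (List (String × String)))) : List (List (String × String)) :=
  ((PySem.List.sorted ((PySem.Dict.mk json_data).getD "json" []) pvApi false).foldl
    (fun (st : List (List (String × String)) × Option String) node =>
      ((if some (pvApi node) ≠ st.2 then st.1 ++ [node] else st.1), some (pvApi node)))
    ([], none)).1

-- ===== PORT B =====
def sort_and_remove_duplicates_alt (json_data : List (String × List (List (String × String)))) : List (List (String × String)) :=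
  let first : PySem.Dict String (List (String × String)) :=
    ((PySem.Dict.mk json_data).getD "json" []).foldl
      (fun d node => d.setdefault (pvApi node) node) PySem.Dict.empty
  (PySem.List.sorted first.keys (fun k => k) false).map (fun k => first.getD k [])

-- ===== PRECONDITION & SPEC =====
-- Pre_: exactly where the Python returns: the top-level dict has key "json" and every node has key "api" (else KeyError).
def Pre_sort_and_remove_duplicates (json_data : List (String × List (List (String × String)))) : Prop :=
  (PySem.Dict.mk json_data).contains "json" = true ∧
  ∀ node ∈ (PySem.Dict.mk json_data).getD "json" [], (PySem.Dict.mk node).contains "api" = true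
instance (json_data : List (String × List (List (String × String)))) : Decidable (Pre_sort_and_remove_duplicates json_data) := by unfold Pre_sort_and_remove_duplicates; infer_instance

def pvWitness_sort_and_remove_duplicates : (List (String × List (List (String × String)))) :=
  [("json", [[("api", "b"), ("name", "x")], [("api", "a")], [("api", "b"), ("name", "y")]])]

def Spec_sort_and_remove_duplicates (json_data : List (String × List (List (String × String)))) (out : List (List (String × String))) : Prop := out = sort_and_remove_duplicates_alt json_data
instance (json_data : List (String × List (List (String × String)))) (out : List (List (String × String))) : Decidable (Spec_sort_and_remove_duplicates json_data out) := by unfold Spec_sort_and_remove_duplicates; infer_instance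

-- ===== CLAIM (what is proved, stated in full; the proofs are below) =====
def Claim_equal_sort_and_remove_duplicates : Prop := ∀ (json_data : List (String × List (List (String × String)))), Dom_sort_and_remove_duplicates json_data → Pre_sort_and_remove_duplicates json_data → Spec_sort_and_remove_duplicates json_data (sort_and_remove_duplicates json_data)

-- ===== LEMMAS AND PROOFS =====

-- A's dedup loop over the (sorted) list, as structural recursion
def pvAdj : Option String → List (List (String × String)) → List (List (String × String))
  | _, [] => []
  | p, y :: ys => if some (pvApi y) ≠ p then y :: pvAdj (some (pvApi y)) ys else pvAdj (some (pvApi y)) ys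

-- first element with the given api
def pvFirst? (k : String) (xs : List (List (String × String))) : Option (List (String × String)) :=
  xs.find? (fun x => pvApi x == k)

theorem pvFirst?_cons_self {x : List (String × String)} {xs : List (List (String × String))}
    {k : String} (h : pvApi x = k) : pvFirst? k (x :: xs) = some x := by
  simp [pvFirst?, h]

theorem pvFirst?_cons_of_ne {x : List (String × String)} {xs : List (List (String × String))}
    {k : String} (h : pvApi x ≠ k) : pvFirst? k (x :: xs) = pvFirst? k xs := by
  simp [pvFirst?, h]

theorem pvFoldA (ys : List (List (String × String))) :
    ∀ (acc : List (List (String × String))) (p : Option String),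
    (ys.foldl
      (fun (st : List (List (String × String)) × Option String) node =>
        ((if some (pvApi node) ≠ st.2 then st.1 ++ [node] else st.1), some (pvApi node)))
      (acc, p)).1 = acc ++ pvAdj p ys := by
  induction ys with
  | nil => intro acc p; simp [pvAdj]
  | cons y ys ih =>
    intro acc p
    rw [List.foldl_cons]
    by_cases h : some (pvApi y) = p
    · rw [if_neg (show ¬ some (pvApi y) ≠ (acc, p).2 from by simp [h]), ih]
      have hadj : pvAdj p (y :: ys) = pvAdj (some (pvApi y)) ys := by simp [pvAdj, h]
      rw [hadj]
    · rw [if_pos (show some (pvApi y) ≠ (acc, p).2 from h), ih]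
      have hadj : pvAdj p (y :: ys) = y :: pvAdj (some (pvApi y)) ys := by simp [pvAdj, h]
      rw [hadj]
      simp

-- B's dict loop: a lookup in the final dict is the FIRST node with that api
theorem pvFoldB_get? (xs : List (List (String × String))) :
    ∀ (d : PySem.Dict String (List (String × String))) (k : String),
    (xs.foldl (fun d node => d.setdefault (pvApi node) node) d).get? k
      = (d.get? k).or (pvFirst? k xs) := by
  induction xs with
  | nil => intro d k; simp [pvFirst?]
  | cons x xs ih =>
    intro d k
    rw [List.foldl_cons, ih]
    by_cases h : pvApi x = k
    · subst h
      rw [PySem.Dict.get?_setdefault_self d (pvApi x) x, pvFirst?_cons_self rfl]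
      cases d.get? (pvApi x) <;> rfl
    · rw [PySem.Dict.get?_setdefault_of_ne d x (Ne.symm h), pvFirst?_cons_of_ne h]

theorem pvFoldB_nodup_keys (xs : List (List (String × String))) :
    ∀ (d : PySem.Dict String (List (String × String))), d.keys.Nodup →
    (xs.foldl (fun d node => d.setdefault (pvApi node) node) d).keys.Nodup := by
  induction xs with
  | nil => intro d h; exact h
  | cons x xs ih =>
    intro d h
    rw [List.foldl_cons]
    apply ih
    by_cases hc : d.contains (pvApi x) = true
    · rw [PySem.Dict.setdefault_of_contains d x hc]; exact h
    · rw [PySem.Dict.setdefault_of_not_contains d x (by simpa using hc),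
        PySem.Dict.keys_insert_of_not_contains _ _ (by simpa using hc)]
      simp only [List.nodup_append, List.nodup_cons, List.nodup_nil]
      refine ⟨h, by simp, ?_⟩
      intro a ha b hb
      rw [List.mem_singleton] at hb
      subst hb
      exact fun he => hc (by simpa [PySem.Dict.contains_iff_mem_keys, he] using ha)

theorem pvAdj_gt (ys : List (List (String × String))) :
    ∀ (k : String), ys.Pairwise (fun a b => pvApi a ≤ pvApi b) → (∀ z ∈ ys, k ≤ pvApi z) →
    (pvAdj (some k) ys).Pairwise (fun a b => pvApi a < pvApi b) ∧
    (∀ z ∈ pvAdj (some k) ys, k < pvApi z) := by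
  induction ys with
  | nil => intro k _ _; simp [pvAdj]
  | cons y ys ih =>
    intro k hpw hb
    rcases List.pairwise_cons.1 hpw with ⟨hy, hp⟩
    by_cases h : pvApi y = k
    · have hadj : pvAdj (some k) (y :: ys) = pvAdj (some k) ys := by simp [pvAdj, h]
      rw [hadj]
      exact ih k hp (fun z hz => hb z (List.mem_cons_of_mem _ hz))
    · have hky : k < pvApi y := lt_of_le_of_ne (hb y List.mem_cons_self) (Ne.symm h)
      have hadj : pvAdj (some k) (y :: ys) = y :: pvAdj (some (pvApi y)) ys := by simp [pvAdj, h]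
      rw [hadj]
      rcases ih (pvApi y) hp hy with ⟨hpw', hgt⟩
      refine ⟨List.pairwise_cons.2 ⟨hgt, hpw'⟩, ?_⟩
      intro z hz
      rcases List.mem_cons.1 hz with rfl | hz
      · exact hky
      · exact hky.trans (hgt z hz)

theorem pvAdj_none_cons (y : List (String × String)) (ys : List (List (String × String))) :
    pvAdj none (y :: ys) = y :: pvAdj (some (pvApi y)) ys := by simp [pvAdj]

theorem pvAdj_none_pairwise (ys : List (List (String × String)))
    (hpw : ys.Pairwise (fun a b => pvApi a ≤ pvApi b)) :
    (pvAdj none ys).Pairwise (fun a b => pvApi a < pvApi b) := by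
  cases ys with
  | nil => simp [pvAdj]
  | cons y ys =>
    rcases List.pairwise_cons.1 hpw with ⟨hy, hp⟩
    rcases pvAdj_gt ys (pvApi y) hp hy with ⟨hpw', hgt⟩
    rw [pvAdj_none_cons]
    exact List.pairwise_cons.2 ⟨hgt, hpw'⟩

theorem pvMem_adj_some (ys : List (List (String × String))) :
    ∀ (k : String) (y : List (String × String)),
    ys.Pairwise (fun a b => pvApi a ≤ pvApi b) → (∀ z ∈ ys, k ≤ pvApi z) →
    (y ∈ pvAdj (some k) ys ↔ pvApi y ≠ k ∧ pvFirst? (pvApi y) ys = some y) := by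
  induction ys with
  | nil => intro k y _ _; simp [pvAdj, pvFirst?]
  | cons x xs ih =>
    intro k y hpw hb
    rcases List.pairwise_cons.1 hpw with ⟨hx, hp⟩
    by_cases h : pvApi x = k
    · have hadj : pvAdj (some k) (x :: xs) = pvAdj (some k) xs := by simp [pvAdj, h]
      rw [hadj]
      by_cases hyk : pvApi y = k
      · constructor
        · intro hm
          have hlt := (pvAdj_gt xs k hp (fun z hz => hb z (List.mem_cons_of_mem _ hz))).2 y hm
          exact absurd hyk (ne_of_gt hlt)
        · rintro ⟨hne, _⟩; exact absurd hyk hne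
      · rw [pvFirst?_cons_of_ne (x := x) (k := pvApi y) (fun he => hyk (he ▸ h))]
        exact ih k y hp (fun z hz => hb z (List.mem_cons_of_mem _ hz))
    · have hadj : pvAdj (some k) (x :: xs) = x :: pvAdj (some (pvApi x)) xs := by simp [pvAdj, h]
      rw [hadj]
      have hkx : k < pvApi x := lt_of_le_of_ne (hb x List.mem_cons_self) (Ne.symm h)
      constructor
      · intro hm
        rcases List.mem_cons.1 hm with rfl | hm
        · exact ⟨h, pvFirst?_cons_self rfl⟩
        · rcases (ih (pvApi x) y hp hx).1 hm with ⟨hne, hf⟩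
          have hlt : pvApi x < pvApi y := (pvAdj_gt xs (pvApi x) hp hx).2 y hm
          exact ⟨ne_of_gt (hkx.trans hlt),
            by rw [pvFirst?_cons_of_ne (fun he => hne he.symm)]; exact hf⟩
      · rintro ⟨hyk, hf⟩
        by_cases hxy : pvApi x = pvApi y
        · obtain rfl : x = y :=
            Option.some.inj ((pvFirst?_cons_self (xs := xs) hxy).symm.trans hf)
          exact List.mem_cons_self
        · have hf' : pvFirst? (pvApi y) xs = some y := by
            rw [pvFirst?_cons_of_ne hxy] at hf; exact hf
          exact List.mem_cons_of_mem _
            ((ih (pvApi x) y hp hx).2 ⟨fun he => hxy he.symm, hf'⟩)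

theorem pvMem_adj_none (ys : List (List (String × String))) (y : List (String × String))
    (hpw : ys.Pairwise (fun a b => pvApi a ≤ pvApi b)) :
    y ∈ pvAdj none ys ↔ pvFirst? (pvApi y) ys = some y := by
  cases ys with
  | nil => simp [pvAdj, pvFirst?]
  | cons x xs =>
    rcases List.pairwise_cons.1 hpw with ⟨hx, hp⟩
    rw [pvAdj_none_cons]
    constructor
    · intro hm
      rcases List.mem_cons.1 hm with rfl | hm
      · exact pvFirst?_cons_self rfl
      · rcases (pvMem_adj_some xs (pvApi x) y hp hx).1 hm with ⟨hne, hf⟩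
        rw [pvFirst?_cons_of_ne (fun he => hne he.symm)]
        exact hf
    · intro hf
      by_cases hxy : pvApi x = pvApi y
      · obtain rfl : x = y :=
          Option.some.inj ((pvFirst?_cons_self (xs := xs) hxy).symm.trans hf)
        exact List.mem_cons_self
      · have hf' : pvFirst? (pvApi y) xs = some y := by
          rw [pvFirst?_cons_of_ne hxy] at hf; exact hf
        exact List.mem_cons_of_mem _
          ((pvMem_adj_some xs (pvApi x) y hp hx).2 ⟨fun he => hxy he.symm, hf'⟩)

theorem pvInsertBy_first? (ys : List (List (String × String))) :
    ∀ (x : List (String × String)) (k : String),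
    ys.Pairwise (fun a b => pvApi a ≤ pvApi b) →
    pvFirst? k (PySem.List.insertBy (fun a b => decide (pvApi a < pvApi b)) x ys) =
      (pvFirst? k ys).or (if pvApi x = k then some x else none) := by
  induction ys with
  | nil =>
    intro x k _
    by_cases h : pvApi x = k <;> simp [PySem.List.insertBy, pvFirst?, h]
  | cons y ys ih =>
    intro x k hpw
    rcases List.pairwise_cons.1 hpw with ⟨hy, hp⟩
    by_cases hb : pvApi x < pvApi y
    · have hib : PySem.List.insertBy (fun a b => decide (pvApi a < pvApi b)) x (y :: ys) =
          x :: y :: ys := by simp [PySem.List.insertBy, hb]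
      rw [hib]
      by_cases h : pvApi x = k
      · have hnone : pvFirst? k (y :: ys) = none := by
          rw [pvFirst?, List.find?_eq_none]
          intro z hz
          have hkz : k < pvApi z := by
            rcases List.mem_cons.1 hz with rfl | hz
            · exact h ▸ hb
            · exact h ▸ (hb.trans_le (hy z hz))
          simp only [beq_iff_eq]
          exact ne_of_gt hkz
        rw [pvFirst?_cons_self h, hnone, if_pos h]
        rfl
      · rw [pvFirst?_cons_of_ne h, if_neg h, Option.or_none]
    · have hib : PySem.List.insertBy (fun a b => decide (pvApi a < pvApi b)) x (y :: ys) =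
          y :: PySem.List.insertBy (fun a b => decide (pvApi a < pvApi b)) x ys := by
        simp [PySem.List.insertBy, hb]
      rw [hib]
      by_cases hyk : pvApi y = k
      · rw [pvFirst?_cons_self hyk, pvFirst?_cons_self hyk]
        rfl
      · rw [pvFirst?_cons_of_ne hyk, pvFirst?_cons_of_ne hyk]
        exact ih x k hp

theorem pvFirst?_sorted (xs : List (List (String × String))) (k : String) :
    pvFirst? k (PySem.List.sorted xs pvApi false) = pvFirst? k xs := by
  induction xs using List.reverseRecOn with
  | nil => simp [PySem.List.sorted_eq_foldl_insertBy]
  | append_singleton xs x ih =>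
    have hstep : PySem.List.sorted (xs ++ [x]) pvApi false =
        PySem.List.insertBy (fun a b => decide (pvApi a < pvApi b)) x
          (PySem.List.sorted xs pvApi false) := by
      rw [PySem.List.sorted_eq_foldl_insertBy, List.foldl_append, List.foldl_cons, List.foldl_nil,
        ← PySem.List.sorted_eq_foldl_insertBy]
    have hsplit : pvFirst? k (xs ++ [x]) =
        (pvFirst? k xs).or (if pvApi x = k then some x else none) := by
      unfold pvFirst?
      rw [List.find?_append]
      congr 1
      by_cases h : pvApi x = k <;> simp [h]
    rw [hstep, pvInsertBy_first? _ x k (PySem.List.sorted_pairwise xs pvApi), ih, hsplit]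

theorem pvMain (xs : List (List (String × String))) :
    pvAdj none (PySem.List.sorted xs pvApi false) =
      (PySem.List.sorted
        ((xs.foldl (fun d node => d.setdefault (pvApi node) node) PySem.Dict.empty).keys)
        (fun k => k) false).map
        (fun k => (xs.foldl (fun d node => d.setdefault (pvApi node) node) PySem.Dict.empty).getD k []) := by
  set first := xs.foldl (fun d node => d.setdefault (pvApi node) node) PySem.Dict.empty with hfirst
  have hget : ∀ k, first.get? k = pvFirst? k xs := by
    intro k
    rw [hfirst, pvFoldB_get? xs PySem.Dict.empty k]
    simp
  have hndk : first.keys.Nodup :=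
    pvFoldB_nodup_keys xs PySem.Dict.empty (by simp [PySem.Dict.keys_empty])
  set K := PySem.List.sorted first.keys (fun k => k) false with hK
  have hKperm : K.Perm first.keys := PySem.List.sorted_perm _ _ _
  have hKnd : K.Nodup := hKperm.nodup_iff.2 hndk
  have hKle : K.Pairwise (fun a b => a ≤ b) := PySem.List.sorted_pairwise _ _
  have hKlt : K.Pairwise (fun a b : String => a < b) :=
    (hKle.and hKnd).imp (fun h => lt_of_le_of_ne h.1 h.2)
  have hmemK : ∀ k, k ∈ K ↔ (pvFirst? k xs).isSome := by
    intro k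
    rw [hKperm.mem_iff, ← PySem.Dict.contains_iff_mem_keys, PySem.Dict.contains_eq_isSome_get?,
      hget]
  have hapiK : ∀ k ∈ K, pvApi (first.getD k []) = k ∧ pvFirst? k xs = some (first.getD k []) := by
    intro k hk
    have hs := (hmemK k).1 hk
    rcases Option.isSome_iff_exists.1 hs with ⟨y, hy⟩
    have hgd : first.getD k [] = y := PySem.Dict.getD_of_get?_eq_some first [] ((hget k).trans hy)
    have hpy : pvApi y = k := by
      have := List.find?_some hy
      simpa using this
    rw [hgd]
    exact ⟨hpy, hy⟩
  set bs := K.map (fun k => first.getD k []) with hbs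
  have hbslt : bs.Pairwise (fun a b => pvApi a < pvApi b) := by
    rw [hbs, List.pairwise_map]
    exact hKlt.imp_of_mem (fun {a b} ha hb h => by
      rw [(hapiK a ha).1, (hapiK b hb).1]; exact h)
  have hmembs : ∀ y, y ∈ bs ↔ pvFirst? (pvApi y) xs = some y := by
    intro y
    rw [hbs]
    constructor
    · intro hm
      rcases List.mem_map.1 hm with ⟨k, hk, rfl⟩
      rcases hapiK k hk with ⟨h1, h2⟩
      rw [h1]
      exact h2
    · intro hf
      have hk : pvApi y ∈ K := (hmemK _).2 (by rw [hf]; rfl)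
      refine List.mem_map.2 ⟨pvApi y, hk, ?_⟩
      exact PySem.Dict.getD_of_get?_eq_some first [] ((hget _).trans hf)
  -- A's side
  have hsp := PySem.List.sorted_pairwise xs pvApi
  have halt := pvAdj_none_pairwise _ hsp
  have hand1 : (pvAdj none (PySem.List.sorted xs pvApi false)).Nodup :=
    halt.imp (fun h he => absurd (he ▸ h) (lt_irrefl _))
  have hand2 : bs.Nodup := by
    refine List.Nodup.of_map pvApi ?_
    have : bs.map pvApi = K := by
      rw [hbs, List.map_map]
      exact List.map_congr_left (fun k hk => (hapiK k hk).1) |>.trans (List.map_id _)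
    rw [this]
    exact hKnd
  have hmem : ∀ y, y ∈ pvAdj none (PySem.List.sorted xs pvApi false) ↔ y ∈ bs := by
    intro y
    rw [pvMem_adj_none _ y hsp, pvFirst?_sorted, hmembs]
  have hperm : (pvAdj none (PySem.List.sorted xs pvApi false)).Perm bs :=
    (List.perm_ext_iff_of_nodup hand1 hand2).2 hmem
  exact List.Perm.eq_of_pairwise
    (fun a b _ _ h1 h2 => absurd (h1.trans h2) (lt_irrefl _)) halt hbslt hperm

-- ===== VERDICT (by name: the statement is the Claim_ definition above) =====
theorem sort_and_remove_duplicates_spec : Claim_equal_sort_and_remove_duplicates := by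
  intro json_data _ _
  unfold Spec_sort_and_remove_duplicates sort_and_remove_duplicates sort_and_remove_duplicates_alt
  rw [pvFoldA]
  simpa using pvMain ((PySem.Dict.mk json_data).getD "json" [])
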